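-- pv_equiv track=rewrite | github.com/RobinTPotter/grep_iplayer | grep_iplayer.py | generate_corner_text
-- ===== SOURCE A (Python) =====
-- def generate_corner_text(name):
--     titles = name.split('-')
--     nn = 3
--     numparts = int(len(titles) / nn) +1
--     t = []
--     for r in range(0,nn):
--         end = (r+1)*numparts
--         t.append(' '.join(titles[r*numparts:end]))
--     return t
-- ===== SOURCE B (Python) =====
-- def generate_corner_text(name):
--     titles = name.split('-')
--     numparts = len(titles) // 3 + 1
--     buckets = ([], [], [])
--     for index, part in enumerate(titles):
--         buckets[index // numparts].append(part)
--     return [' '.join(b) for b in buckets]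
-- ===== Notes on version B (the rewrite author's own statement) =====
-- stated objective: alternative
-- what changed: Replaces the three slice-and-join passes over range(3) with a single distributing pass: one enumerate loop appends each part to bucket index//numparts, then the three buckets are joined.
import Mathlib
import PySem

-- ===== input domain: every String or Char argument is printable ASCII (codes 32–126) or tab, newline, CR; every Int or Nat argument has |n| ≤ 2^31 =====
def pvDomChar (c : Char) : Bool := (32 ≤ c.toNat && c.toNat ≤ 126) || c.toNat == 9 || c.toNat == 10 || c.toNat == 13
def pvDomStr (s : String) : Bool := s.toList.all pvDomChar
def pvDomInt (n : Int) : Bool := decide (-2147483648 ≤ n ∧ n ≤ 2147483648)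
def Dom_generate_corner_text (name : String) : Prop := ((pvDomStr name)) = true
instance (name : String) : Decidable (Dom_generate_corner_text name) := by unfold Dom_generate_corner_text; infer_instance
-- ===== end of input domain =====

-- B makes a single distributing pass over enumerate(titles) into three buckets instead of A's three slice scans; same O(n) cost, different decomposition.

-- ===== PORT A =====
def generate_corner_text (name : String) : List String :=
  let titles := (PySem.Str.split? name "-").getD []  -- sep "-" ≠ "", so split? is some
  let nn : Int := 3
  -- int(len(titles)/nn): true division then truncation; len ≥ 0 and nn = 3 > 0, so this is floor division (exact on this domain)
  let numparts : Int := PySem.Int.floordiv (titles.length : Int) nn + 1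
  (PySem.List.pyRange 0 nn 1).foldl
    (fun t r =>
      let e := (r + 1) * numparts
      t ++ [PySem.Str.join " " (PySem.List.slice titles (some (r * numparts)) (some e))])
    ([] : List String)

-- ===== PORT B =====
def generate_corner_text_alt (name : String) : List String :=
  let titles := (PySem.Str.split? name "-").getD []  -- sep "-" ≠ "", so split? is some
  let numparts : Int := PySem.Int.floordiv (titles.length : Int) 3 + 1
  -- buckets[index // numparts].append(part): the tuple index is 0, 1 or 2 (it never reaches 3), ported as the three cases
  let b := (PySem.List.enumerate titles 0).foldl
    (fun (b : List String × List String × List String) ip =>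
      let j := PySem.Int.floordiv ip.1 numparts
      if j = 0 then (b.1 ++ [ip.2], b.2.1, b.2.2)
      else if j = 1 then (b.1, b.2.1 ++ [ip.2], b.2.2)
      else (b.1, b.2.1, b.2.2 ++ [ip.2]))
    ([], [], [])
  [PySem.Str.join " " b.1, PySem.Str.join " " b.2.1, PySem.Str.join " " b.2.2]

-- ===== PRECONDITION & SPEC =====
def Spec_generate_corner_text (name : String) (out : List String) : Prop := out = generate_corner_text_alt name
instance (name : String) (out : List String) : Decidable (Spec_generate_corner_text name out) := by unfold Spec_generate_corner_text; infer_instance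

-- ===== CLAIM (what is proved, stated in full; the proofs are below) =====
def Claim_equal_generate_corner_text : Prop := ∀ (name : String), Dom_generate_corner_text name → Spec_generate_corner_text name (generate_corner_text name)

-- ===== LEMMAS AND PROOFS =====

-- B's fold over enumerate, characterised: starting at global index k with buckets b,
-- it appends the three contiguous regions of xs determined by index // p.
theorem pv_fold_buckets (p : Nat) (hp : 1 ≤ p) :
    ∀ (xs : List String) (k : Nat) (b : List String × List String × List String),
    (PySem.List.enumerate xs (k : Int)).foldl
      (fun (b : List String × List String × List String) ip =>
        let j := PySem.Int.floordiv ip.1 (p : Int)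
        if j = 0 then (b.1 ++ [ip.2], b.2.1, b.2.2)
        else if j = 1 then (b.1, b.2.1 ++ [ip.2], b.2.2)
        else (b.1, b.2.1, b.2.2 ++ [ip.2])) b
    = (b.1 ++ xs.take (p - k),
       b.2.1 ++ (xs.drop (p - k)).take (2 * p - max k p),
       b.2.2 ++ xs.drop (2 * p - k)) := by
  intro xs
  induction xs with
  | nil => intro k b; simp [PySem.List.enumerate_nil]
  | cons x xs ih =>
    intro k b
    rw [PySem.List.enumerate_cons, List.foldl_cons,
        show (k : Int) + 1 = ((k + 1 : Nat) : Int) by push_cast; ring, ih]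
    have hdiv : PySem.Int.floordiv (k : Int) (p : Int) = ((k / p : Nat) : Int) :=
      PySem.Int.floordiv_natCast k p
    rcases lt_or_ge k p with hk | hk
    · -- bucket 0
      have h0 : k / p = 0 := Nat.div_eq_of_lt hk
      rw [show p - k = (p - (k + 1)) + 1 by omega, show 2 * p - k = (2 * p - (k + 1)) + 1 by omega]
      simp [hdiv, h0, show max k p = p by omega, show max (k + 1) p = p by omega,
        List.take_succ_cons, List.drop_succ_cons]
    · rcases lt_or_ge k (2 * p) with hk2 | hk2
      · -- bucket 1
        have h0 : k / p = 1 := Nat.div_eq_of_lt_le (by omega) (by omega)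
        rw [show 2 * p - max k p = (2 * p - max (k + 1) p) + 1 by omega]
        simp [hdiv, h0, show p - k = 0 by omega, show p - (k + 1) = 0 by omega,
          List.take_succ_cons, List.drop_succ_cons,
          show 2 * p - k = (2 * p - (k + 1)) + 1 by omega]
      · -- bucket 2
        have h0 : 2 ≤ k / p := (Nat.le_div_iff_mul_le (by omega)).mpr (by omega)
        have hne0 : ((k : Int) / (p : Int) ≠ 0) := by
          rw [← Int.natCast_div]; exact_mod_cast (by omega : ¬ (k / p = 0))
        have hne1 : ((k : Int) / (p : Int) ≠ 1) := by
          rw [← Int.natCast_div]; exact_mod_cast (by omega : ¬ (k / p = 1))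
        simp [hdiv, hne0, hne1, show p - k = 0 by omega, show p - (k + 1) = 0 by omega,
          show 2 * p - max k p = 0 by omega, show 2 * p - max (k + 1) p = 0 by omega,
          show 2 * p - k = 0 by omega, show 2 * p - (k + 1) = 0 by omega]

theorem generate_corner_text_eq (name : String) :
    generate_corner_text name = generate_corner_text_alt name := by
  unfold generate_corner_text generate_corner_text_alt
  dsimp only
  set titles := (PySem.Str.split? name "-").getD [] with htitles
  set n := titles.length with hn
  set p := n / 3 + 1 with hp
  have hnp : PySem.Int.floordiv (n : Int) 3 + 1 = ((p : Nat) : Int) := by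
    rw [show (3 : Int) = ((3 : Nat) : Int) by norm_num, PySem.Int.floordiv_natCast, hp]
    push_cast; ring
  rw [show PySem.List.pyRange 0 3 1 = [0, 1, 2] from by decide]
  simp only [List.foldl_cons, List.foldl_nil, List.nil_append, hnp]
  have key := pv_fold_buckets p (by omega) titles 0 ([], [], [])
  dsimp only at key
  rw [Nat.cast_zero] at key
  rw [key]
  norm_num
  constructor
  · rw [show (2 * (p : Int)) = ((2 * p : Nat) : Int) by push_cast; ring,
        PySem.List.slice_natCast]
  · rw [show (2 * (p : Int)) = ((2 * p : Nat) : Int) by push_cast; ring,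
        show (3 * (p : Int)) = ((3 * p : Nat) : Int) by push_cast; ring,
        PySem.List.slice_natCast]
    congr 1
    rw [show 3 * p - 2 * p = p by omega]
    rw [List.take_of_length_le]
    rw [List.length_drop]
    omega

-- ===== VERDICT (by name: the statement is the Claim_ definition above) =====
theorem generate_corner_text_spec : Claim_equal_generate_corner_text := by
  intro name _
  unfold Spec_generate_corner_text
  exact generate_corner_text_eq name
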